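-- pv_equiv track=rewrite | github.com/kp2657/causal-graph-engine | pipelines/state_space/program_labeler.py | _assign_hallmark_annotations
-- ===== SOURCE A (Python) =====
-- _HALLMARK_KEYWORDS: dict[str, list[str]] = {
--     "HALLMARK_TNFA_SIGNALING_VIA_NFKB": ["TNF", "NFKB1", "NFKBIA", "IL1B", "IL6"],
--     "HALLMARK_INFLAMMATORY_RESPONSE":    ["IL1B", "IL6", "CXCL10", "CCL2", "IFNG"],
--     "HALLMARK_TGF_BETA_SIGNALING":       ["TGFB1", "TGFB2", "SMAD3", "SMAD2"],
--     "HALLMARK_EPITHELIAL_MESENCHYMAL_TRANSITION": ["VIM", "FN1", "ACTA2", "COL1A1"],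
--     "HALLMARK_HYPOXIA":                  ["HIF1A", "EPAS1", "VEGFA", "LDHA"],
--     "HALLMARK_MYC_TARGETS_V1":           ["MKI67", "TOP2A", "CDK4", "PCNA"],
--     "HALLMARK_INTERFERON_GAMMA_RESPONSE": ["STAT1", "IRF1", "CXCL10", "CXCL9", "GBP1"],
--     "HALLMARK_OXIDATIVE_PHOSPHORYLATION": ["UQCRFS1", "COX6A1", "ATP5F1A", "NDUFS1"],
--     "HALLMARK_FATTY_ACID_METABOLISM":    ["FASN", "ACACA", "ACSL1", "CPT1A", "SCD"],
--     "HALLMARK_UNFOLDED_PROTEIN_RESPONSE": ["ATF6", "XBP1", "DDIT3", "HSPA5"],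
-- }
--
-- _MIN_OVERLAP = 2   # minimum gene overlap to assign a type / hallmark annotation
--
-- def _assign_hallmark_annotations(top_genes: list[str]) -> list[str]:
--     """Return Hallmark set names that overlap sufficiently with top_genes."""
--     gene_set = frozenset(g.upper() for g in top_genes)
--     annotations: list[str] = []
--     for hallmark, markers in _HALLMARK_KEYWORDS.items():
--         overlap = len(gene_set & frozenset(m.upper() for m in markers))
--         if overlap >= _MIN_OVERLAP:
--             annotations.append(hallmark)
--     return annotations
-- ===== SOURCE B (Python) =====
-- # Hand-written inverted index: uppercased marker gene -> hallmark names containing it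
-- # (equivalent to inverting _HALLMARK_KEYWORDS; hallmark output order given by _HALLMARK_ORDER).
-- _GENE_TO_HALLMARKS: dict[str, list[str]] = {
--     "TNF": ["HALLMARK_TNFA_SIGNALING_VIA_NFKB"],
--     "NFKB1": ["HALLMARK_TNFA_SIGNALING_VIA_NFKB"],
--     "NFKBIA": ["HALLMARK_TNFA_SIGNALING_VIA_NFKB"],
--     "IL1B": ["HALLMARK_TNFA_SIGNALING_VIA_NFKB", "HALLMARK_INFLAMMATORY_RESPONSE"],
--     "IL6": ["HALLMARK_TNFA_SIGNALING_VIA_NFKB", "HALLMARK_INFLAMMATORY_RESPONSE"],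
--     "CXCL10": ["HALLMARK_INFLAMMATORY_RESPONSE", "HALLMARK_INTERFERON_GAMMA_RESPONSE"],
--     "CCL2": ["HALLMARK_INFLAMMATORY_RESPONSE"],
--     "IFNG": ["HALLMARK_INFLAMMATORY_RESPONSE"],
--     "TGFB1": ["HALLMARK_TGF_BETA_SIGNALING"],
--     "TGFB2": ["HALLMARK_TGF_BETA_SIGNALING"],
--     "SMAD3": ["HALLMARK_TGF_BETA_SIGNALING"],
--     "SMAD2": ["HALLMARK_TGF_BETA_SIGNALING"],
--     "VIM": ["HALLMARK_EPITHELIAL_MESENCHYMAL_TRANSITION"],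
--     "FN1": ["HALLMARK_EPITHELIAL_MESENCHYMAL_TRANSITION"],
--     "ACTA2": ["HALLMARK_EPITHELIAL_MESENCHYMAL_TRANSITION"],
--     "COL1A1": ["HALLMARK_EPITHELIAL_MESENCHYMAL_TRANSITION"],
--     "HIF1A": ["HALLMARK_HYPOXIA"],
--     "EPAS1": ["HALLMARK_HYPOXIA"],
--     "VEGFA": ["HALLMARK_HYPOXIA"],
--     "LDHA": ["HALLMARK_HYPOXIA"],
--     "MKI67": ["HALLMARK_MYC_TARGETS_V1"],
--     "TOP2A": ["HALLMARK_MYC_TARGETS_V1"],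
--     "CDK4": ["HALLMARK_MYC_TARGETS_V1"],
--     "PCNA": ["HALLMARK_MYC_TARGETS_V1"],
--     "STAT1": ["HALLMARK_INTERFERON_GAMMA_RESPONSE"],
--     "IRF1": ["HALLMARK_INTERFERON_GAMMA_RESPONSE"],
--     "CXCL9": ["HALLMARK_INTERFERON_GAMMA_RESPONSE"],
--     "GBP1": ["HALLMARK_INTERFERON_GAMMA_RESPONSE"],
--     "UQCRFS1": ["HALLMARK_OXIDATIVE_PHOSPHORYLATION"],
--     "COX6A1": ["HALLMARK_OXIDATIVE_PHOSPHORYLATION"],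
--     "ATP5F1A": ["HALLMARK_OXIDATIVE_PHOSPHORYLATION"],
--     "NDUFS1": ["HALLMARK_OXIDATIVE_PHOSPHORYLATION"],
--     "FASN": ["HALLMARK_FATTY_ACID_METABOLISM"],
--     "ACACA": ["HALLMARK_FATTY_ACID_METABOLISM"],
--     "ACSL1": ["HALLMARK_FATTY_ACID_METABOLISM"],
--     "CPT1A": ["HALLMARK_FATTY_ACID_METABOLISM"],
--     "SCD": ["HALLMARK_FATTY_ACID_METABOLISM"],
--     "ATF6": ["HALLMARK_UNFOLDED_PROTEIN_RESPONSE"],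
--     "XBP1": ["HALLMARK_UNFOLDED_PROTEIN_RESPONSE"],
--     "DDIT3": ["HALLMARK_UNFOLDED_PROTEIN_RESPONSE"],
--     "HSPA5": ["HALLMARK_UNFOLDED_PROTEIN_RESPONSE"],
-- }
--
-- _HALLMARK_ORDER: list[str] = ["HALLMARK_TNFA_SIGNALING_VIA_NFKB", "HALLMARK_INFLAMMATORY_RESPONSE", "HALLMARK_TGF_BETA_SIGNALING", "HALLMARK_EPITHELIAL_MESENCHYMAL_TRANSITION", "HALLMARK_HYPOXIA", "HALLMARK_MYC_TARGETS_V1", "HALLMARK_INTERFERON_GAMMA_RESPONSE", "HALLMARK_OXIDATIVE_PHOSPHORYLATION", "HALLMARK_FATTY_ACID_METABOLISM", "HALLMARK_UNFOLDED_PROTEIN_RESPONSE"]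
--
-- _MIN_OVERLAP = 2
--
--
-- def _assign_hallmark_annotations(top_genes: list[str]) -> list[str]:
--     """Return Hallmark set names that overlap sufficiently with top_genes."""
--     counts: dict[str, int] = {}
--     for g in set(g.upper() for g in top_genes):
--         for h in _GENE_TO_HALLMARKS.get(g, []):
--             counts[h] = counts.get(h, 0) + 1
--     return [h for h in _HALLMARK_ORDER if counts.get(h, 0) >= _MIN_OVERLAP]
-- ===== Notes on version B (the rewrite author's own statement) =====
-- stated objective: alternative
-- what changed: Replaces the per-hallmark frozenset intersections with a hand-written inverted index (uppercased marker gene -> hallmark names): one counting pass over the deduplicated input genes increments per-hallmark overlap counters, then hallmarks are emitted in the fixed order list when the counter reaches the threshold.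
import Mathlib
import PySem

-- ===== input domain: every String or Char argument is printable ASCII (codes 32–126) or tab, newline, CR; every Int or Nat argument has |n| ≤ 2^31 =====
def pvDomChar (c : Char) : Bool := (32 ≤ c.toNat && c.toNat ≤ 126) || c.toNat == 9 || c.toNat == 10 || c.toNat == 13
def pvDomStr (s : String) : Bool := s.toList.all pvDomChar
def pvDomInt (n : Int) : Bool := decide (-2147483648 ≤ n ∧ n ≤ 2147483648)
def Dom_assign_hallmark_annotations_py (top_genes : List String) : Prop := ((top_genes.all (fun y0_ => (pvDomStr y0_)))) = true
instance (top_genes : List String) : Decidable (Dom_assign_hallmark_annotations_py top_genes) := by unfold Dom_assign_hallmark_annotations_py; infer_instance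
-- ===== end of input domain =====

-- B replaces A's ten per-hallmark frozenset intersections by a hand-written inverted index
-- (uppercased marker gene -> hallmark names) and one counting pass over the deduplicated
-- input genes; objective: alternative (a different data structure, same cost class).

-- ===== PORT A =====
-- the module constant _HALLMARK_KEYWORDS, as an association list in insertion order
def pvHallmarks : List (String × List String) :=
  [("HALLMARK_TNFA_SIGNALING_VIA_NFKB", ["TNF", "NFKB1", "NFKBIA", "IL1B", "IL6"]),
   ("HALLMARK_INFLAMMATORY_RESPONSE", ["IL1B", "IL6", "CXCL10", "CCL2", "IFNG"]),
   ("HALLMARK_TGF_BETA_SIGNALING", ["TGFB1", "TGFB2", "SMAD3", "SMAD2"]),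
   ("HALLMARK_EPITHELIAL_MESENCHYMAL_TRANSITION", ["VIM", "FN1", "ACTA2", "COL1A1"]),
   ("HALLMARK_HYPOXIA", ["HIF1A", "EPAS1", "VEGFA", "LDHA"]),
   ("HALLMARK_MYC_TARGETS_V1", ["MKI67", "TOP2A", "CDK4", "PCNA"]),
   ("HALLMARK_INTERFERON_GAMMA_RESPONSE", ["STAT1", "IRF1", "CXCL10", "CXCL9", "GBP1"]),
   ("HALLMARK_OXIDATIVE_PHOSPHORYLATION", ["UQCRFS1", "COX6A1", "ATP5F1A", "NDUFS1"]),
   ("HALLMARK_FATTY_ACID_METABOLISM", ["FASN", "ACACA", "ACSL1", "CPT1A", "SCD"]),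
   ("HALLMARK_UNFOLDED_PROTEIN_RESPONSE", ["ATF6", "XBP1", "DDIT3", "HSPA5"])]

def assign_hallmark_annotations_py (top_genes : List String) : List String :=
  let gene_set : PySem.Set String := PySem.Set.ofList (top_genes.map (fun g => PySem.Str.upper g))
  pvHallmarks.foldl (fun annotations hm =>
    let overlap := (PySem.Set.inter gene_set (PySem.Set.ofList (hm.2.map (fun m => PySem.Str.upper m)))).length
    if 2 ≤ overlap then annotations ++ [hm.1] else annotations) []

-- ===== PORT B =====
-- Source B's module constant _GENE_TO_HALLMARKS: a literal dict, uppercased marker gene -> hallmark names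
def pvGeneIndex : PySem.Dict String (List String) := PySem.Dict.ofList
  [("TNF", ["HALLMARK_TNFA_SIGNALING_VIA_NFKB"]),
   ("NFKB1", ["HALLMARK_TNFA_SIGNALING_VIA_NFKB"]),
   ("NFKBIA", ["HALLMARK_TNFA_SIGNALING_VIA_NFKB"]),
   ("IL1B", ["HALLMARK_TNFA_SIGNALING_VIA_NFKB", "HALLMARK_INFLAMMATORY_RESPONSE"]),
   ("IL6", ["HALLMARK_TNFA_SIGNALING_VIA_NFKB", "HALLMARK_INFLAMMATORY_RESPONSE"]),
   ("CXCL10", ["HALLMARK_INFLAMMATORY_RESPONSE", "HALLMARK_INTERFERON_GAMMA_RESPONSE"]),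
   ("CCL2", ["HALLMARK_INFLAMMATORY_RESPONSE"]),
   ("IFNG", ["HALLMARK_INFLAMMATORY_RESPONSE"]),
   ("TGFB1", ["HALLMARK_TGF_BETA_SIGNALING"]),
   ("TGFB2", ["HALLMARK_TGF_BETA_SIGNALING"]),
   ("SMAD3", ["HALLMARK_TGF_BETA_SIGNALING"]),
   ("SMAD2", ["HALLMARK_TGF_BETA_SIGNALING"]),
   ("VIM", ["HALLMARK_EPITHELIAL_MESENCHYMAL_TRANSITION"]),
   ("FN1", ["HALLMARK_EPITHELIAL_MESENCHYMAL_TRANSITION"]),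
   ("ACTA2", ["HALLMARK_EPITHELIAL_MESENCHYMAL_TRANSITION"]),
   ("COL1A1", ["HALLMARK_EPITHELIAL_MESENCHYMAL_TRANSITION"]),
   ("HIF1A", ["HALLMARK_HYPOXIA"]),
   ("EPAS1", ["HALLMARK_HYPOXIA"]),
   ("VEGFA", ["HALLMARK_HYPOXIA"]),
   ("LDHA", ["HALLMARK_HYPOXIA"]),
   ("MKI67", ["HALLMARK_MYC_TARGETS_V1"]),
   ("TOP2A", ["HALLMARK_MYC_TARGETS_V1"]),
   ("CDK4", ["HALLMARK_MYC_TARGETS_V1"]),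
   ("PCNA", ["HALLMARK_MYC_TARGETS_V1"]),
   ("STAT1", ["HALLMARK_INTERFERON_GAMMA_RESPONSE"]),
   ("IRF1", ["HALLMARK_INTERFERON_GAMMA_RESPONSE"]),
   ("CXCL9", ["HALLMARK_INTERFERON_GAMMA_RESPONSE"]),
   ("GBP1", ["HALLMARK_INTERFERON_GAMMA_RESPONSE"]),
   ("UQCRFS1", ["HALLMARK_OXIDATIVE_PHOSPHORYLATION"]),
   ("COX6A1", ["HALLMARK_OXIDATIVE_PHOSPHORYLATION"]),
   ("ATP5F1A", ["HALLMARK_OXIDATIVE_PHOSPHORYLATION"]),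
   ("NDUFS1", ["HALLMARK_OXIDATIVE_PHOSPHORYLATION"]),
   ("FASN", ["HALLMARK_FATTY_ACID_METABOLISM"]),
   ("ACACA", ["HALLMARK_FATTY_ACID_METABOLISM"]),
   ("ACSL1", ["HALLMARK_FATTY_ACID_METABOLISM"]),
   ("CPT1A", ["HALLMARK_FATTY_ACID_METABOLISM"]),
   ("SCD", ["HALLMARK_FATTY_ACID_METABOLISM"]),
   ("ATF6", ["HALLMARK_UNFOLDED_PROTEIN_RESPONSE"]),
   ("XBP1", ["HALLMARK_UNFOLDED_PROTEIN_RESPONSE"]),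
   ("DDIT3", ["HALLMARK_UNFOLDED_PROTEIN_RESPONSE"]),
   ("HSPA5", ["HALLMARK_UNFOLDED_PROTEIN_RESPONSE"])]

-- Source B's module constant _HALLMARK_ORDER
def pvHallmarkOrder : List String := ["HALLMARK_TNFA_SIGNALING_VIA_NFKB", "HALLMARK_INFLAMMATORY_RESPONSE", "HALLMARK_TGF_BETA_SIGNALING", "HALLMARK_EPITHELIAL_MESENCHYMAL_TRANSITION", "HALLMARK_HYPOXIA", "HALLMARK_MYC_TARGETS_V1", "HALLMARK_INTERFERON_GAMMA_RESPONSE", "HALLMARK_OXIDATIVE_PHOSPHORYLATION", "HALLMARK_FATTY_ACID_METABOLISM", "HALLMARK_UNFOLDED_PROTEIN_RESPONSE"]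

def assign_hallmark_annotations_py_alt (top_genes : List String) : List String :=
  let gene_set : PySem.Set String := PySem.Set.ofList (top_genes.map (fun g => PySem.Str.upper g))
  let counts : PySem.Dict String Int :=
    gene_set.foldl (fun d g =>
      (pvGeneIndex.getD g []).foldl (fun d h => d.insert h (d.getD h 0 + 1)) d)
      PySem.Dict.empty
  pvHallmarkOrder.filter (fun h => 2 ≤ counts.getD h 0)

-- ===== PRECONDITION & SPEC =====
def Spec_assign_hallmark_annotations_py (top_genes : List String) (out : List String) : Prop := out = assign_hallmark_annotations_py_alt top_genes
instance (top_genes : List String) (out : List String) : Decidable (Spec_assign_hallmark_annotations_py top_genes out) := by unfold Spec_assign_hallmark_annotations_py; infer_instance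

-- ===== CLAIM (what is proved, stated in full; the proofs are below) =====
def Claim_equal_assign_hallmark_annotations_py : Prop := ∀ (top_genes : List String), Dom_assign_hallmark_annotations_py top_genes → Spec_assign_hallmark_annotations_py top_genes (assign_hallmark_annotations_py top_genes)

-- ===== LEMMAS AND PROOFS =====

-- the inverted index flattened into (uppercased gene, hallmark) pairs
def pvPairsList : List (String × String) := [("TNF", "HALLMARK_TNFA_SIGNALING_VIA_NFKB"), ("NFKB1", "HALLMARK_TNFA_SIGNALING_VIA_NFKB"), ("NFKBIA", "HALLMARK_TNFA_SIGNALING_VIA_NFKB"), ("IL1B", "HALLMARK_TNFA_SIGNALING_VIA_NFKB"), ("IL6", "HALLMARK_TNFA_SIGNALING_VIA_NFKB"), ("IL1B", "HALLMARK_INFLAMMATORY_RESPONSE"), ("IL6", "HALLMARK_INFLAMMATORY_RESPONSE"), ("CXCL10", "HALLMARK_INFLAMMATORY_RESPONSE"), ("CCL2", "HALLMARK_INFLAMMATORY_RESPONSE"), ("IFNG", "HALLMARK_INFLAMMATORY_RESPONSE"), ("TGFB1", "HALLMARK_TGF_BETA_SIGNALING"), ("TGFB2", "HALLMARK_TGF_BETA_SIGNALING"),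 ("SMAD3", "HALLMARK_TGF_BETA_SIGNALING"), ("SMAD2", "HALLMARK_TGF_BETA_SIGNALING"), ("VIM", "HALLMARK_EPITHELIAL_MESENCHYMAL_TRANSITION"), ("FN1", "HALLMARK_EPITHELIAL_MESENCHYMAL_TRANSITION"), ("ACTA2", "HALLMARK_EPITHELIAL_MESENCHYMAL_TRANSITION"), ("COL1A1", "HALLMARK_EPITHELIAL_MESENCHYMAL_TRANSITION"), ("HIF1A", "HALLMARK_HYPOXIA"), ("EPAS1", "HALLMARK_HYPOXIA"), ("VEGFA", "HALLMARK_HYPOXIA"), ("LDHA", "HALLMARK_HYPOXIA"), ("MKI67", "HALLMARK_MYC_TARGETS_V1"), ("TOP2A", "HALLMARK_MYC_TARGETS_V1"), ("CDK4", "HALLMARK_MYC_TARGETS_V1"), ("PCNA", "HALLMARK_MYC_TARGETS_V1"), ("STAT1", "HALLMARK_INTERFERON_GAMMA_RESPONSE"), ("IRF1", "HALLMARK_INTERFERON_GAMMA_RESPONSE"), ("CXCL10", "HALLMARK_INTERFERON_GAMMA_RESPONSE"), ("CXCL9", "HALLMARK_INTERFERON_GAMMA_RESPONSE"), ("GBP1",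 "HALLMARK_INTERFERON_GAMMA_RESPONSE"), ("UQCRFS1", "HALLMARK_OXIDATIVE_PHOSPHORYLATION"), ("COX6A1", "HALLMARK_OXIDATIVE_PHOSPHORYLATION"), ("ATP5F1A", "HALLMARK_OXIDATIVE_PHOSPHORYLATION"), ("NDUFS1", "HALLMARK_OXIDATIVE_PHOSPHORYLATION"), ("FASN", "HALLMARK_FATTY_ACID_METABOLISM"), ("ACACA", "HALLMARK_FATTY_ACID_METABOLISM"), ("ACSL1", "HALLMARK_FATTY_ACID_METABOLISM"), ("CPT1A", "HALLMARK_FATTY_ACID_METABOLISM"), ("SCD", "HALLMARK_FATTY_ACID_METABOLISM"), ("ATF6", "HALLMARK_UNFOLDED_PROTEIN_RESPONSE"), ("XBP1", "HALLMARK_UNFOLDED_PROTEIN_RESPONSE"), ("DDIT3", "HALLMARK_UNFOLDED_PROTEIN_RESPONSE"), ("HSPA5", "HALLMARK_UNFOLDED_PROTEIN_RESPONSE")]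

set_option maxRecDepth 40000 in
set_option maxHeartbeats 2000000 in
theorem pvGeneIndex_eq : pvGeneIndex =
    pvPairsList.foldl (fun d p => d.modify p.1 [] (fun l => l ++ [p.2])) PySem.Dict.empty := by
  decide

theorem idx_getD (g : String) :
    pvGeneIndex.getD g [] = (pvPairsList.filter (fun p => p.1 == g)).map (fun p => p.2) := by
  rw [pvGeneIndex_eq, PySem.Dict.getD_foldl_modify_append]
  simp

theorem counts_getD (L : List String) (h : String) :
    (L.foldl (fun d g =>
        (pvGeneIndex.getD g []).foldl (fun d h' => d.insert h' (d.getD h' 0 + 1)) d)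
      PySem.Dict.empty).getD h 0
    = ((L.flatMap (fun g => pvGeneIndex.getD g [])).count h : Int) := by
  rw [← List.foldl_flatMap, PySem.Dict.getD_foldl_insert_add_one]
  simp

theorem sum_map_eq_countP {α : Type} (p : α → Bool) (f : α → Nat)
    (hpt : ∀ x, f x = if p x then 1 else 0) (L : List α) :
    (L.map f).sum = L.countP p := by
  induction L with
  | nil => simp
  | cons x t ih => simp [List.countP_cons, hpt, ih]; split <;> omega

theorem idx_count (h g : String) :
    (pvGeneIndex.getD g []).count h
      = List.countP (fun p => p.2 == h && p.1 == g) pvPairsList := by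
  rw [idx_getD, List.count_eq_countP, List.countP_map, List.countP_filter]
  rfl

theorem per_hallmark (L : List String) (h : String) (M : List String)
    (hup : PySem.Set.ofList (M.map (fun m => PySem.Str.upper m)) = M)
    (hidx : ∀ g, List.countP (fun p => p.2 == h && p.1 == g) pvPairsList = if g ∈ M then 1 else 0) :
    decide (2 ≤ (PySem.Set.inter L (PySem.Set.ofList (M.map (fun m => PySem.Str.upper m)))).length)
    = decide ((2:Int) ≤ ((L.map (fun g => List.countP (fun p => p.2 == h && p.1 == g) pvPairsList)).sum : Nat)) := by
  rw [hup]
  rw [show (L.map (fun g => List.countP (fun p => p.2 == h && p.1 == g) pvPairsList)).sum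
      = L.countP (fun g => decide (g ∈ M)) from
    sum_map_eq_countP _ _ (by intro g; rw [hidx g]; split <;> simp_all) L]
  rw [show PySem.Set.inter L M = L.filter (fun x => decide (x ∈ M)) from by
    unfold PySem.Set.inter
    exact List.filter_congr (by intro x _; rw [Bool.eq_iff_iff]; simp)]
  rw [← List.countP_eq_length_filter, decide_eq_decide]
  omega

-- ===== VERDICT (by name: the statement is the Claim_ definition above) =====
set_option maxRecDepth 40000 in
theorem assign_hallmark_annotations_py_spec : Claim_equal_assign_hallmark_annotations_py := by
  intro tg _
  unfold Spec_assign_hallmark_annotations_py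
  unfold assign_hallmark_annotations_py assign_hallmark_annotations_py_alt
  rw [show pvHallmarkOrder = pvHallmarks.map (fun hm => hm.1) from rfl]
  simp only [PySem.List.foldl_append_ite, List.nil_append, List.filter_map, counts_getD,
    List.count_flatMap, Function.comp_def, idx_count]
  congr 1
  apply List.filter_congr
  intro hm hmem
  fin_cases hmem <;>
    exact per_hallmark _ _ _ (by decide)
      (by intro g; simp only [pvPairsList, List.countP_cons, List.countP_nil];
          simp [List.mem_cons, beq_iff_eq]; split_ifs <;> simp_all [eq_comm])
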